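-- pv_equiv track=rewrite | github.com/mapardo-lab/spaceshipTitanic | src/utilsML.py | constrained_combinations
-- ===== SOURCE A (Python) =====
-- from itertools import product
--
-- def constrained_combinations(list_of_lists):
--     """
--     Generate constrained combinations from a list of lists.
--
--     This function computes all possible combinations of elements from input lists
--     with the following constraints:
--     1. At least one element must be selected from at least two different input lists
--     2. None values are excluded from the final combinations
--     3. Results are flattened into single-level lists
--     """
--     # Generate all possible combinations (including None for "no element")
--     expanded = [lst + [None] for lst in list_of_lists]
--
--     # Compute Cartesian product (all possible combinations)
--     all_combinations = product(*expanded)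
--
--     # Filter combinations to:
--     # 1. Exclude None-only selections
--     # 2. Remove None placeholders
--     # 3. Ensure at least 2 elements
--     # 4. Flatten combinations
--     result = [
--         [item for sublist in combo
--          for item in (sublist if isinstance(sublist, list) else [sublist]) if item is not None]
--         for combo in all_combinations
--         if sum(1 for item in combo if item is not None) >= 2
--     ]
--
--     return result
-- ===== SOURCE B (Python) =====
-- def constrained_combinations(list_of_lists):
--     """Depth-first recursive enumeration: at each position try every element of
--     the list (in order), then the 'skip' choice; emit the accumulated selection
--     when at least two elements were picked. Same output/order as the
--     product-based version on lists of ints."""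
--     results = []
--     n = len(list_of_lists)
--
--     def go(i, acc, count):
--         if i == n:
--             if count >= 2:
--                 results.append(acc)
--         else:
--             for item in list_of_lists[i]:
--                 go(i + 1, acc + [item], count + 1)
--             go(i + 1, acc, count)
--
--     go(0, [], 0)
--     return results
-- ===== Notes on version B (the rewrite author's own statement) =====
-- stated objective: alternative
-- what changed: Replaces the itertools.product-over-expanded-lists + filter/flatten comprehension with a depth-first recursion over the list index that carries the accumulated selection and a picked-element counter, emitting a result at the leaves when at least two elements were picked.
import Mathlib
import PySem

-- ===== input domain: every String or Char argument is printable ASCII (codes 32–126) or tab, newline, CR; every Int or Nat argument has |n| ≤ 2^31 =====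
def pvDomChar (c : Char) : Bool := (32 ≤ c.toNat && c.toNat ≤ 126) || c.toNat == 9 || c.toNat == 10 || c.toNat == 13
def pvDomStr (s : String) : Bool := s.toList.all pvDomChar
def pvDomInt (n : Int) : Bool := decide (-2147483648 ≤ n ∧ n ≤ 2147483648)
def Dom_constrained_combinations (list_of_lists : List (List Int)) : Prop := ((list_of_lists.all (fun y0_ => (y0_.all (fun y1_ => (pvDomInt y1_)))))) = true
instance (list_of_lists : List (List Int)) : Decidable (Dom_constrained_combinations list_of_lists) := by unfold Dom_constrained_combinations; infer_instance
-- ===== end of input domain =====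

-- B replaces the itertools.product materialisation with a depth-first recursion carrying an
-- accumulator and a picked-element counter (objective: alternative decomposition, same output order).

-- ===== PORT A =====
-- itertools.product over the expanded lists (each list plus the None placeholder), first list slowest
def pvProduct : List (List (Option Int)) → List (List (Option Int))
  | [] => [[]]
  | l :: ls => l.flatMap (fun x => (pvProduct ls).map (fun c => x :: c))

def constrained_combinations (list_of_lists : List (List Int)) : List (List Int) :=
  let expanded := list_of_lists.map (fun lst => lst.map some ++ [none])
  ((pvProduct expanded).filter
      (fun combo => 2 ≤ combo.countP (fun item => item.isSome))).map
    (fun combo => combo.filterMap (fun item => item))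

-- ===== PORT B =====
-- depth-first recursion: at each position try each element (in order), then the skip choice
def pvGo : List (List Int) → List Int → Nat → List (List Int)
  | [], acc, count => if 2 ≤ count then [acc] else []
  | lst :: rest, acc, count =>
      lst.flatMap (fun item => pvGo rest (acc ++ [item]) (count + 1)) ++ pvGo rest acc count

def constrained_combinations_alt (list_of_lists : List (List Int)) : List (List Int) :=
  pvGo list_of_lists [] 0

-- ===== PRECONDITION & SPEC =====
def Spec_constrained_combinations (list_of_lists : List (List Int)) (out : List (List Int)) : Prop := out = constrained_combinations_alt list_of_lists
instance (list_of_lists : List (List Int)) (out : List (List Int)) : Decidable (Spec_constrained_combinations list_of_lists out) := by unfold Spec_constrained_combinations; infer_instance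

-- ===== CLAIM (what is proved, stated in full; the proofs are below) =====
def Claim_equal_constrained_combinations : Prop := ∀ (list_of_lists : List (List Int)), Dom_constrained_combinations list_of_lists → Spec_constrained_combinations list_of_lists (constrained_combinations list_of_lists)

-- ===== LEMMAS AND PROOFS =====
lemma pv_filter_map_eq_filterMap {α β : Type} (p : α → Bool) (f : α → β) (l : List α) :
    (l.filter p).map f = l.filterMap (fun a => if p a then some (f a) else none) := by
  induction l with
  | nil => rfl
  | cons a l ih =>
    by_cases h : p a = true <;> simp [h, ih]

lemma pv_filterMap_flatMap {α β γ : Type} (l : List α) (g : α → List β) (f : β → Option γ) :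
    (l.flatMap g).filterMap f = l.flatMap (fun a => (g a).filterMap f) := by
  induction l with
  | nil => rfl
  | cons a l ih => simp [List.flatMap_cons, List.filterMap_append, ih]

lemma pv_go_eq (ls : List (List Int)) (acc : List Int) (cnt : Nat) :
    ((pvProduct (ls.map (fun lst => lst.map some ++ [none]))).filterMap
      (fun c => if 2 ≤ cnt + c.countP (fun item => item.isSome)
                then some (acc ++ c.filterMap (fun item => item)) else none))
      = pvGo ls acc cnt := by
  induction ls generalizing acc cnt with
  | nil => by_cases h : 2 ≤ cnt <;> simp [pvProduct, pvGo, h]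
  | cons lst rest ih =>
    simp only [List.map_cons, pvProduct, pvGo, List.flatMap_append, List.flatMap_cons,
      List.flatMap_nil, List.append_nil, List.flatMap_map, List.filterMap_append,
      pv_filterMap_flatMap, List.filterMap_map, Function.comp_def]
    congr 1
    · refine List.flatMap_congr (fun v hv => ?_)
      rw [← ih (acc ++ [v]) (cnt + 1)]
      refine List.filterMap_congr (fun c hc => ?_)
      simp only [List.countP_cons, Option.isSome_some, if_true,
        List.filterMap_cons, List.append_assoc, List.singleton_append]
      split_ifs <;> first | rfl | omega
    · rw [← ih acc cnt]
      simp

-- ===== VERDICT (by name: the statement is the Claim_ definition above) =====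
theorem constrained_combinations_spec : Claim_equal_constrained_combinations := by
  intro lol _
  unfold Spec_constrained_combinations constrained_combinations constrained_combinations_alt
  rw [pv_filter_map_eq_filterMap]
  simpa using pv_go_eq lol [] 0
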